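-- pv_equiv track=rewrite | github.com/sandlerj/tickTack | minimaxCaching.py | getTransforms
-- ===== SOURCE A (Python) =====
-- import copy
--
-- def rotate2DArray(A):
--   oldNumRows = len(A)
--   oldNumCols = len(A[0])
--   newNumRows = oldNumCols
--   newNumCols = oldNumRows
--   result = [[None for col in range(newNumCols)] for row in range(newNumRows)]
--   for row in range(oldNumRows):
--     for col in range(oldNumCols):
--       newRow = col
--       newCol = newNumCols - (row + 1)
--       result[newRow][newCol] = A[row][col]
--   return result
--
-- def mirror2DArray(A, axis):
--   numRows = len(A)
--   numCols = len(A[0])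
--   result = [[None for col in range(numCols)] for row in range(numRows)]
--   if (axis not in {0,1}):
--     raise Exception('must define axis (see help(mirror2DArray)')
--   for row in range(numRows):
--     for col in range(numCols):
--       if axis == 0:
--         newRow = numRows - (row + 1)
--         newCol = col
--       if axis == 1:
--         newRow = row
--         newCol = numCols - (col + 1)
--       result[newRow][newCol] = A[row][col]
--   return result
--
-- def getTransforms(board):
--   tmpBoard = copy.deepcopy(board)
--   transforms = [tmpBoard]
--   for _ in range(3):
--     tmpBoard = rotate2DArray(tmpBoard)
--     transforms.append(tmpBoard)
--   mirror = mirror2DArray(tmpBoard, 1)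
--   transforms.append(mirror)
--   for _ in range(3):
--     mirror = rotate2DArray(mirror)
--     transforms.append(mirror)
--   return transforms
-- ===== SOURCE B (Python) =====
-- def getTransforms(board):
--     # Copy every cell exactly once into a base grid, then build each of the
--     # 8 dihedral transforms independently by a direct index map into base.
--     base = [list(row) for row in board]
--     n = len(board)
--     m = len(board[0])
--
--     def build(R, C, f):
--         return [[base[f(i, j)[0]][f(i, j)[1]] for j in range(C)] for i in range(R)]
--
--     return [
--         base,
--         build(m, n, lambda i, j: (n - 1 - j, i)),          # rot 90 cw
--         build(n, m, lambda i, j: (n - 1 - i, m - 1 - j)),  # rot 180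
--         build(m, n, lambda i, j: (j, m - 1 - i)),          # rot 270 cw
--         build(m, n, lambda i, j: (n - 1 - j, m - 1 - i)),  # mirror of rot 270
--         build(n, m, lambda i, j: (n - 1 - i, j)),          # and its rotations
--         build(m, n, lambda i, j: (j, i)),
--         build(n, m, lambda i, j: (i, m - 1 - j)),
--     ]
-- ===== Notes on version B (the rewrite author's own statement) =====
-- stated objective: alternative
-- what changed: Instead of chaining rotate-after-rotate and mirror (each pass allocating and filling an intermediate None-grid by destination-index assignment), B copies the board once and builds each of the 8 dihedral transforms independently from precomputed direct coordinate maps into that base grid.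
import Mathlib
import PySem

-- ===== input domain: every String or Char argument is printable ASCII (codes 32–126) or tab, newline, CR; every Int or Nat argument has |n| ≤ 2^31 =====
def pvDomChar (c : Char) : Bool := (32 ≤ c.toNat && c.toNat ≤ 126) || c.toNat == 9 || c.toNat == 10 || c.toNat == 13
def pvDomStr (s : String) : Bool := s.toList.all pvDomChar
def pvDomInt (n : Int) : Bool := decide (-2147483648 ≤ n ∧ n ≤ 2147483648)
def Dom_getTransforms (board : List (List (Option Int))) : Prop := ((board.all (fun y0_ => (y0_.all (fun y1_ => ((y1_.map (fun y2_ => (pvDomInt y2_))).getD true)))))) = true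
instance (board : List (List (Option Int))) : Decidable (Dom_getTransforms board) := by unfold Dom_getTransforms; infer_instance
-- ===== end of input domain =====

-- B builds the 8 transforms independently from direct coordinate maps into a once-copied
-- base grid instead of A's chained rotate/mirror passes; equivalence is about return values.

-- ===== PORT A =====

-- Python A[r][c]; in-range on every access A performs inside Pre_
def pvGet2d (res : List (List (Option Int))) (r c : Nat) : Option Int :=
  (res.getD r []).getD c none

-- Python result[r][c] = v
def pvSet2d (res : List (List (Option Int))) (r c : Nat) (v : Option Int) : List (List (Option Int)) :=
  res.set r ((res.getD r []).set c v)

def rotate2DArray (A : List (List (Option Int))) : List (List (Option Int)) :=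
  let oldNumRows := A.length
  let oldNumCols := A.headI.length  -- len(A[0]); Python raises IndexError on A = [] (outside Pre_)
  let newNumRows := oldNumCols
  let newNumCols := oldNumRows
  let result := List.replicate newNumRows (List.replicate newNumCols (none : Option Int))
  (List.range oldNumRows).foldl (fun result row =>
    (List.range oldNumCols).foldl (fun result col =>
      pvSet2d result col (newNumCols - (row + 1)) (pvGet2d A row col)) result) result

def mirror2DArray (A : List (List (Option Int))) (axis : Int) : List (List (Option Int)) :=
  let numRows := A.length
  let numCols := A.headI.length  -- len(A[0]); Python raises IndexError on A = [] (outside Pre_)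
  let result := List.replicate numRows (List.replicate numCols (none : Option Int))
  if axis ≠ 0 ∧ axis ≠ 1 then result  -- Python raises; unreachable: getTransforms only calls axis = 1
  else
    (List.range numRows).foldl (fun result row =>
      (List.range numCols).foldl (fun result col =>
        let newRow := if axis == 0 then numRows - (row + 1) else row
        let newCol := if axis == 0 then col else numCols - (col + 1)
        pvSet2d result newRow newCol (pvGet2d A row col)) result) result

def getTransforms (board : List (List (Option Int))) : List (List (List (Option Int))) :=
  let tmpBoard := board  -- copy.deepcopy: cells are immutable, value copy
  let transforms := [tmpBoard]
  let s1 := (List.range 3).foldl (fun (s : List (List (List (Option Int))) × List (List (Option Int))) _ =>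
    let t := rotate2DArray s.2
    (s.1 ++ [t], t)) (transforms, tmpBoard)
  let mirror := mirror2DArray s1.2 1
  let transforms2 := s1.1 ++ [mirror]
  let s2 := (List.range 3).foldl (fun (s : List (List (List (Option Int))) × List (List (Option Int))) _ =>
    let t := rotate2DArray s.2
    (s.1 ++ [t], t)) (transforms2, mirror)
  s2.1

-- ===== PORT B =====

-- [[base[f(i,j)[0]][f(i,j)[1]] for j in range(C)] for i in range(R)]
def pvBuild (R C : Nat) (f : Nat → Nat → Nat × Nat) (base : List (List (Option Int))) : List (List (Option Int)) :=
  (List.range R).map (fun i => (List.range C).map (fun j => pvGet2d base (f i j).1 (f i j).2))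

def getTransforms_alt (board : List (List (Option Int))) : List (List (List (Option Int))) :=
  let base := board.map (fun row => row)  -- list(row): one copy of each cell; value-identical
  let n := board.length
  let m := board.headI.length  -- len(board[0]); Python raises IndexError on board = [] (outside Pre_)
  [ base,
    pvBuild m n (fun i j => (n - 1 - j, i)) base,
    pvBuild n m (fun i j => (n - 1 - i, m - 1 - j)) base,
    pvBuild m n (fun i j => (j, m - 1 - i)) base,
    pvBuild m n (fun i j => (n - 1 - j, m - 1 - i)) base,
    pvBuild n m (fun i j => (n - 1 - i, j)) base,
    pvBuild m n (fun i j => (j, i)) base,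
    pvBuild n m (fun i j => (i, m - 1 - j)) base ]

-- ===== PRECONDITION & SPEC =====
-- Exactly where Python A returns: a nonempty board with nonempty first row whose every row
-- is at least as long as the first (shorter rows make A's rotate raise IndexError).
def Pre_getTransforms (board : List (List (Option Int))) : Prop :=
  board ≠ [] ∧ board.headI ≠ [] ∧ ∀ row ∈ board, board.headI.length ≤ row.length

instance (board : List (List (Option Int))) : Decidable (Pre_getTransforms board) := by
  unfold Pre_getTransforms; infer_instance

def pvWitness_getTransforms : List (List (Option Int)) :=
  [[some 1, none], [some 2, some 3]]

def Spec_getTransforms (board : List (List (Option Int))) (out : List (List (List (Option Int)))) : Prop := out = getTransforms_alt board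
instance (board : List (List (Option Int))) (out : List (List (List (Option Int)))) : Decidable (Spec_getTransforms board out) := by unfold Spec_getTransforms; infer_instance

-- ===== CLAIM (what is proved, stated in full; the proofs are below) =====
def Claim_equal_getTransforms : Prop := ∀ (board : List (List (Option Int))), Dom_getTransforms board → Pre_getTransforms board → Spec_getTransforms board (getTransforms board)


-- ===== LEMMAS AND PROOFS =====

-- a grid with M rows, each of length N (via getD-indexing)
def pvShape (M N : Nat) (res : List (List (Option Int))) : Prop :=
  res.length = M ∧ ∀ i < M, (res.getD i []).length = N

theorem pvSet2d_getD (res : List (List (Option Int))) (r c : Nat) (v : Option Int) (i : Nat) :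
    (pvSet2d res r c v).getD i [] =
      if r = i ∧ r < res.length then (res.getD r []).set c v else res.getD i [] := by
  simp only [pvSet2d, List.getD_eq_getElem?_getD, List.getElem?_set]
  by_cases h1 : r = i
  · subst h1
    by_cases h2 : r < res.length
    · simp [h2]
    · have hnone : res[r]? = none := List.getElem?_eq_none_iff.mpr (Nat.le_of_not_lt h2)
      simp [h2, hnone]
  · simp [h1]

theorem pvShape_set2d {M N : Nat} {res : List (List (Option Int))} (hs : pvShape M N res)
    (r c : Nat) (v : Option Int) : pvShape M N (pvSet2d res r c v) := by
  refine ⟨by simp [pvSet2d, hs.1], fun i hi => ?_⟩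
  rw [pvSet2d_getD]
  split_ifs with h
  · obtain ⟨rfl, hr⟩ := h
    rw [List.length_set]
    exact hs.2 r hi
  · exact hs.2 i hi

theorem pvGet2d_set2d (res : List (List (Option Int))) (r c : Nat) (v : Option Int) (i j : Nat) :
    pvGet2d (pvSet2d res r c v) i j =
      if r = i ∧ c = j ∧ r < res.length ∧ c < (res.getD r []).length then v
      else pvGet2d res i j := by
  by_cases h1 : r = i ∧ r < res.length
  · obtain ⟨rfl, hr⟩ := h1
    simp only [pvGet2d]
    rw [pvSet2d_getD, if_pos (⟨rfl, hr⟩ : r = r ∧ r < res.length)]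
    simp only [List.getD_eq_getElem?_getD, List.getElem?_set]
    by_cases h2 : c = j
    · subst h2
      simp only [hr, List.getElem?_eq_getElem, Option.getD_some, if_true, reduceIte]
      split_ifs with h1 h2 h2
      · rfl
      · exact absurd ⟨trivial, trivial, trivial, h1⟩ h2
      · exact absurd h2.2.2.2 h1
      · simp [List.getElem?_eq_none_iff.mpr (Nat.le_of_not_lt h1)]
    · simp [h2]
  · simp only [pvGet2d, pvSet2d_getD, if_neg h1]
    rw [if_neg (by tauto)]

theorem pvShape_foldl {M N : Nat} (g : List (List (Option Int)) → Nat → List (List (Option Int)))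
    (hg : ∀ res c, pvShape M N res → pvShape M N (g res c)) :
    ∀ (L : List Nat) (res : List (List (Option Int))), pvShape M N res →
      pvShape M N (L.foldl g res) := by
  intro L
  induction L with
  | nil => intro res hs; exact hs
  | cons a L ih => intro res hs; exact ih _ (hg res a hs)

-- inner loop of rotate2DArray for one source row: result[col][tr] := A[row][col]
set_option maxRecDepth 20000 in
theorem rotInner_get (A : List (List (Option Int))) (row tr : Nat) {M N : Nat} :
    ∀ (k : Nat) (res : List (List (Option Int))), pvShape M N res → ∀ i j,
      pvGet2d ((List.range k).foldl
        (fun r col => pvSet2d r col tr (pvGet2d A row col)) res) i j =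
      if i < k ∧ i < M ∧ j = tr ∧ tr < N then pvGet2d A row i else pvGet2d res i j := by
  intro k
  induction k with
  | zero => intro res hs i j; simp
  | succ k ih =>
      intro res hs i j
      rw [List.range_succ, List.foldl_append]
      simp only [List.foldl_cons, List.foldl_nil]
      have hsk := pvShape_foldl _ (fun r c h => pvShape_set2d h c tr (pvGet2d A row c))
        (List.range k) res hs
      rw [pvGet2d_set2d, ih res hs i j, hsk.1]
      by_cases hkM : k < M
      · rw [hsk.2 k hkM]
        by_cases h1 : k = i <;> by_cases h2 : tr = j <;> by_cases h3 : tr < N <;>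
          split_ifs <;> first | rfl | (exfalso; omega) | (congr 2 <;> omega)
      · split_ifs <;> first | rfl | (exfalso; omega) | (congr 2 <;> omega)

-- outer loop of rotate2DArray: rows 0..k-1 written
set_option maxRecDepth 20000 in
theorem rotOuter_get (A : List (List (Option Int))) (n m : Nat) :
    ∀ (k : Nat), k ≤ n → ∀ (res : List (List (Option Int))), pvShape m n res → ∀ i j,
      pvGet2d ((List.range k).foldl
        (fun r row => (List.range m).foldl
          (fun r col => pvSet2d r col (n - (row + 1)) (pvGet2d A row col)) r) res) i j =
      if i < m ∧ j < n ∧ n - k ≤ j then pvGet2d A (n - 1 - j) i else pvGet2d res i j := by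
  intro k
  induction k with
  | zero => intro _ res hs i j; split_ifs <;> first | rfl | (exfalso; omega) | (congr 2 <;> omega)
  | succ k ih =>
      intro hk res hs i j
      rw [List.range_succ, List.foldl_append]
      simp only [List.foldl_cons, List.foldl_nil]
      have hsk : pvShape m n _ := pvShape_foldl _
        (fun r row h => pvShape_foldl _
          (fun r c h' => pvShape_set2d h' c (n - (row + 1)) (pvGet2d A row c))
          (List.range m) r h)
        (List.range k) res hs
      rw [rotInner_get A k (n - (k + 1)) m _ hsk i j, ih (by omega) res hs i j]
      by_cases hj : j = n - (k + 1)
      · subst hj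
        have : n - 1 - (n - (k + 1)) = k := by omega
        rw [this]
        split_ifs <;> first | rfl | (exfalso; omega) | (congr 2 <;> omega)
      · split_ifs <;> first | rfl | (exfalso; omega) | (congr 2 <;> omega)

-- inner loop of mirror2DArray (axis = 1) for one row: result[row][m-(col+1)] := A[row][col]
set_option maxRecDepth 20000 in
theorem mirInner_get (A : List (List (Option Int))) (row m : Nat) {M N : Nat} :
    ∀ (k : Nat), k ≤ m → ∀ (res : List (List (Option Int))), pvShape M N res → ∀ i j,
      pvGet2d ((List.range k).foldl
        (fun r col => pvSet2d r row (m - (col + 1)) (pvGet2d A row col)) res) i j =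
      if i = row ∧ i < M ∧ j < N ∧ j < m ∧ m - k ≤ j then pvGet2d A row (m - 1 - j)
      else pvGet2d res i j := by
  intro k
  induction k with
  | zero => intro _ res hs i j; split_ifs <;> first | rfl | (exfalso; omega) | (congr 2 <;> omega)
  | succ k ih =>
      intro hk res hs i j
      rw [List.range_succ, List.foldl_append]
      simp only [List.foldl_cons, List.foldl_nil]
      have hsk := pvShape_foldl _
        (fun r c h => pvShape_set2d h row (m - (c + 1)) (pvGet2d A row c))
        (List.range k) res hs
      rw [pvGet2d_set2d, ih (by omega) res hs i j, hsk.1]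
      by_cases hrM : row < M
      · rw [hsk.2 row hrM]
        by_cases hj : j = m - (k + 1)
        · subst hj
          have : m - 1 - (m - (k + 1)) = k := by omega
          rw [this]
          split_ifs <;> first | rfl | (exfalso; omega) | (congr 2 <;> omega)
        · split_ifs <;> first | rfl | (exfalso; omega) | (congr 2 <;> omega)
      · split_ifs <;> first | rfl | (exfalso; omega) | (congr 2 <;> omega)

-- outer loop of mirror2DArray (axis = 1)
set_option maxRecDepth 20000 in
theorem mirOuter_get (A : List (List (Option Int))) (n m : Nat) :
    ∀ (k : Nat) (res : List (List (Option Int))), pvShape n m res → ∀ i j,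
      pvGet2d ((List.range k).foldl
        (fun r row => (List.range m).foldl
          (fun r col => pvSet2d r row (m - (col + 1)) (pvGet2d A row col)) r) res) i j =
      if i < k ∧ i < n ∧ j < m then pvGet2d A i (m - 1 - j) else pvGet2d res i j := by
  intro k
  induction k with
  | zero => intro res hs i j; simp
  | succ k ih =>
      intro res hs i j
      rw [List.range_succ, List.foldl_append]
      simp only [List.foldl_cons, List.foldl_nil]
      have hsk : pvShape n m _ := pvShape_foldl _
        (fun r row h => pvShape_foldl _
          (fun r c h' => pvShape_set2d h' row (m - (c + 1)) (pvGet2d A row c))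
          (List.range m) r h)
        (List.range k) res hs
      rw [mirInner_get A k m m (le_refl m) _ hsk i j, ih res hs i j]
      split_ifs <;> first | rfl | (exfalso; omega) | (congr 2 <;> omega)

theorem pvShape_replicate (M N : Nat) :
    pvShape M N (List.replicate M (List.replicate N (none : Option Int))) := by
  refine ⟨by simp, fun i hi => ?_⟩
  rw [List.getD_eq_getElem _ _ (by simpa using hi)]
  simp

-- a grid of the right shape whose cells read back as a pvBuild IS that pvBuild
theorem eq_build_of_get (F : List (List (Option Int))) (M N : Nat)
    (g : Nat → Nat → Nat × Nat) (bd : List (List (Option Int))) (hs : pvShape M N F)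
    (h : ∀ i < M, ∀ j < N, pvGet2d F i j = pvGet2d bd (g i j).1 (g i j).2) :
    F = pvBuild M N g bd := by
  apply List.ext_getElem (by simp [pvBuild, hs.1])
  intro i hi hi'
  have hiM : i < M := hs.1 ▸ hi
  have hR : (pvBuild M N g bd)[i]'hi'
      = (List.range N).map (fun j => pvGet2d bd (g i j).1 (g i j).2) := by
    simp [pvBuild]
  rw [hR]
  have hgd : F.getD i [] = F[i] := List.getD_eq_getElem F [] hi
  apply List.ext_getElem
  · rw [← hgd, hs.2 i hiM]; simp
  · intro j hj hj'
    have hjN : j < N := by rw [← hgd] at hj; rw [hs.2 i hiM] at hj; exact hj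
    have hcell := h i hiM j hjN
    simp only [pvGet2d, List.getD_eq_getElem?_getD, List.getElem?_eq_getElem hi,
      Option.getD_some, List.getElem?_eq_getElem hj, Option.getD_some] at hcell
    rw [List.getElem_map, List.getElem_range]
    rw [hcell]
    simp only [pvGet2d, List.getD_eq_getElem?_getD]

-- rotate2DArray as a direct coordinate map
theorem rotate_eq (A : List (List (Option Int))) :
    rotate2DArray A = pvBuild A.headI.length A.length (fun i j => (A.length - 1 - j, i)) A := by
  have hinit := pvShape_replicate A.headI.length A.length
  simp only [rotate2DArray]
  refine eq_build_of_get _ _ _ _ _ ?_ ?_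
  · exact pvShape_foldl _
      (fun r row h => pvShape_foldl _
        (fun r c h' => pvShape_set2d h' c (A.length - (row + 1)) (pvGet2d A row c))
        (List.range A.headI.length) r h)
      (List.range A.length) _ hinit
  · intro i hi j hj
    rw [rotOuter_get A A.length A.headI.length A.length (le_refl _) _ hinit i j,
      if_pos ⟨hi, hj, by omega⟩]

-- mirror2DArray with axis = 1 as a direct coordinate map
theorem mirror_eq (A : List (List (Option Int))) :
    mirror2DArray A 1 = pvBuild A.length A.headI.length
      (fun i j => (i, A.headI.length - 1 - j)) A := by
  have hinit := pvShape_replicate A.length A.headI.length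
  have hbody : mirror2DArray A 1 = (List.range A.length).foldl
      (fun r row => (List.range A.headI.length).foldl
        (fun r col => pvSet2d r row (A.headI.length - (col + 1)) (pvGet2d A row col)) r)
      (List.replicate A.length (List.replicate A.headI.length (none : Option Int))) := by
    simp [mirror2DArray]
  rw [hbody]
  apply eq_build_of_get _ _ _ _ _
  · exact pvShape_foldl _
      (fun r row h => pvShape_foldl _
        (fun r c h' => pvShape_set2d h' row (A.headI.length - (c + 1)) (pvGet2d A row c))
        (List.range A.headI.length) r h)
      (List.range A.length) _ hinit
  · intro i hi j hj
    show pvGet2d _ i j = pvGet2d A i (A.headI.length - 1 - j)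
    rw [mirOuter_get A A.length A.headI.length A.length _ hinit i j]
    rw [if_pos ⟨hi, hi, hj⟩]

theorem pvBuild_length (R C : Nat) (f : Nat → Nat → Nat × Nat) (bd : List (List (Option Int))) :
    (pvBuild R C f bd).length = R := by simp [pvBuild]

theorem pvBuild_headI_length (R C : Nat) (f : Nat → Nat → Nat × Nat)
    (bd : List (List (Option Int))) (hR : 0 < R) :
    (pvBuild R C f bd).headI.length = C := by
  obtain ⟨R', rfl⟩ : ∃ R', R = R' + 1 := ⟨R - 1, by omega⟩
  simp [pvBuild, List.range_succ_eq_map]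

theorem pvGet2d_build (R C : Nat) (f : Nat → Nat → Nat × Nat) (bd : List (List (Option Int)))
    (i j : Nat) (hi : i < R) (hj : j < C) :
    pvGet2d (pvBuild R C f bd) i j = pvGet2d bd (f i j).1 (f i j).2 := by
  simp [pvGet2d, pvBuild, List.getD_eq_getElem?_getD, List.getElem?_map, List.getElem?_range, hi, hj]

-- pointwise-equal coordinate maps (possibly into different value-equal bases) build equal grids
theorem build_congr (R C : Nat) (g g' : Nat → Nat → Nat × Nat)
    (bd bd' : List (List (Option Int)))
    (h : ∀ i < R, ∀ j < C, pvGet2d bd (g i j).1 (g i j).2 = pvGet2d bd' (g' i j).1 (g' i j).2) :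
    pvBuild R C g bd = pvBuild R C g' bd' := by
  simp only [pvBuild]
  refine List.map_congr_left fun i hi => List.map_congr_left fun j hj => ?_
  exact h i (List.mem_range.1 hi) j (List.mem_range.1 hj)

theorem rotate_build (R C : Nat) (f : Nat → Nat → Nat × Nat) (bd : List (List (Option Int)))
    (hR : 0 < R) :
    rotate2DArray (pvBuild R C f bd) = pvBuild C R (fun i j => f (R - 1 - j) i) bd := by
  rw [rotate_eq, pvBuild_length, pvBuild_headI_length R C f bd hR]
  refine build_congr _ _ _ _ _ _ fun i hi j hj => ?_
  exact pvGet2d_build R C f bd (R - 1 - j) i (by omega) hi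

theorem mirror_build (R C : Nat) (f : Nat → Nat → Nat × Nat) (bd : List (List (Option Int)))
    (hR : 0 < R) :
    mirror2DArray (pvBuild R C f bd) 1 = pvBuild R C (fun i j => f i (C - 1 - j)) bd := by
  rw [mirror_eq, pvBuild_length, pvBuild_headI_length R C f bd hR]
  refine build_congr _ _ _ _ _ _ fun i hi j hj => ?_
  exact pvGet2d_build R C f bd i (C - 1 - j) hi (by omega)

-- ===== VERDICT (by name: the statement is the Claim_ definition above) =====
theorem getTransforms_spec : Claim_equal_getTransforms := by
  intro board _ hpre
  obtain ⟨hne, hhead, _⟩ := hpre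
  have hn : 0 < board.length := List.length_pos_iff.2 hne
  have hm : 0 < board.headI.length := List.length_pos_iff.2 hhead
  set n := board.length with hn'
  set m := board.headI.length with hm'
  have h1 : rotate2DArray board = pvBuild m n (fun i j => (n - 1 - j, i)) board :=
    rotate_eq board
  have h2 : rotate2DArray (pvBuild m n (fun i j => (n - 1 - j, i)) board)
      = pvBuild n m (fun i j => (n - 1 - i, m - 1 - j)) board := by
    rw [rotate_build _ _ _ _ hm]
  have h3 : rotate2DArray (pvBuild n m (fun i j => (n - 1 - i, m - 1 - j)) board)
      = pvBuild m n (fun i j => (j, m - 1 - i)) board := by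
    rw [rotate_build _ _ _ _ hn]
    refine build_congr _ _ _ _ _ _ fun i hi j hj => ?_
    have : n - 1 - (n - 1 - j) = j := by omega
    rw [this]
  have h4 : mirror2DArray (pvBuild m n (fun i j => (j, m - 1 - i)) board) 1
      = pvBuild m n (fun i j => (n - 1 - j, m - 1 - i)) board := by
    rw [mirror_build _ _ _ _ hm]
  have h5 : rotate2DArray (pvBuild m n (fun i j => (n - 1 - j, m - 1 - i)) board)
      = pvBuild n m (fun i j => (n - 1 - i, j)) board := by
    rw [rotate_build _ _ _ _ hm]
    refine build_congr _ _ _ _ _ _ fun i hi j hj => ?_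
    have : m - 1 - (m - 1 - j) = j := by omega
    rw [this]
  have h6 : rotate2DArray (pvBuild n m (fun i j => (n - 1 - i, j)) board)
      = pvBuild m n (fun i j => (j, i)) board := by
    rw [rotate_build _ _ _ _ hn]
    refine build_congr _ _ _ _ _ _ fun i hi j hj => ?_
    have : n - 1 - (n - 1 - j) = j := by omega
    rw [this]
  have h7 : rotate2DArray (pvBuild m n (fun i j => (j, i)) board)
      = pvBuild n m (fun i j => (i, m - 1 - j)) board := by
    rw [rotate_build _ _ _ _ hm]
  show getTransforms board = getTransforms_alt board
  simp only [getTransforms, getTransforms_alt, List.map_id',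
    show List.range 3 = [0, 1, 2] by rfl, List.foldl_cons, List.foldl_nil]
  rw [h1, h2, h3, h4, h5, h6, h7]
  simp only [List.map_id', List.append_assoc, List.singleton_append, List.cons_append,
    List.nil_append]
  rfl
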